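-- pv_equiv track=rewrite | github.com/Pawel-Parma/fusion-flare | src/models/text.py | get_text_len
-- ===== SOURCE A (Python) =====
-- def get_text_len(text):
--     len_text = 0
--     special_char_started = False
--     for char in text:
--         if char == "`":
--             if special_char_started:
--                 special_char_started = False
--                 len_text += 1
--
--             else:
--                 special_char_started = True
--
--         elif not special_char_started:
--             len_text += 1
--
--     return len_text
-- ===== SOURCE B (Python) =====
-- def get_text_len(text):
--     parts = text.split("`")
--     outside = sum(len(p) for i, p in enumerate(parts) if i % 2 == 0)
--     return outside + (len(parts) - 1) // 2
-- ===== Notes on version B (the rewrite author's own statement) =====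
-- stated objective: faster
-- what changed: Replaces the character-by-character state-machine loop with a single split on the backtick character: the even-indexed split segments are the text outside backtick spans, and each completed span contributes one, counted as (len(parts)-1)//2.
import Mathlib
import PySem

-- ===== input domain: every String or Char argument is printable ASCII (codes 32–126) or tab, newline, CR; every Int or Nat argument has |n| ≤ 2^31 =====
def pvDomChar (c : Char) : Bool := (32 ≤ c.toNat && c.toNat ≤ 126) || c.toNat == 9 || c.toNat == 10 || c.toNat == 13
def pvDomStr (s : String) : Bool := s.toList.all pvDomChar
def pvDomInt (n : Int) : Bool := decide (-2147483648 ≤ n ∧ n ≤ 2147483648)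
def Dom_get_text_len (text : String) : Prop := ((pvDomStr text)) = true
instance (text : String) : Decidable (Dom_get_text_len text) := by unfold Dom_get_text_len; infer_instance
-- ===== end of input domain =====

-- B replaces A's character-by-character toggle loop with a single split on the backtick
-- character: even-indexed segments are the text outside spans, plus one per completed span.

-- ===== PORT A =====
-- state = (len_text, special_char_started)
def get_text_len (text : String) : Int :=
  (text.toList.foldl
    (fun st char =>
      if char = '`' then
        if st.2 then (st.1 + 1, false) else (st.1, true)
      else if !st.2 then (st.1 + 1, st.2)
      else st)
    (0, false)).1

-- ===== PORT B =====
def get_text_len_alt (text : String) : Int :=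
  let parts := PySem.Chars.splitOn text.toList ['`']
  let outside := (((PySem.List.enumerate parts 0).filter
      (fun ip => PySem.Int.mod ip.1 2 == 0)).map (fun ip => PySem.List.len ip.2)).sum
  outside + PySem.Int.floordiv (PySem.List.len parts - 1) 2

-- ===== PRECONDITION & SPEC =====
def Spec_get_text_len (text : String) (out : Int) : Prop := out = get_text_len_alt text
instance (text : String) (out : Int) : Decidable (Spec_get_text_len text out) := by unfold Spec_get_text_len; infer_instance

-- ===== CLAIM (what is proved, stated in full; the proofs are below) =====
def Claim_equal_get_text_len : Prop := ∀ (text : String), Dom_get_text_len text → Spec_get_text_len text (get_text_len text)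

-- ===== LEMMAS AND PROOFS =====

-- simple structural model of splitting on a single character
def pvSplit (c : Char) : List Char → List (List Char)
  | [] => [[]]
  | a :: s => if a = c then [] :: pvSplit c s else (pvSplit c s).modifyHead (a :: ·)

lemma pvSplit_ne_nil (c : Char) (s : List Char) : pvSplit c s ≠ [] := by
  induction s with
  | nil => simp [pvSplit]
  | cons a s ih =>
    simp only [pvSplit]
    split_ifs
    · simp
    · intro h
      exact ih (by simpa using congrArg List.length h)

lemma pvSplit_cons (c a : Char) (s : List Char) :
    pvSplit c (a :: s) = if a = c then [] :: pvSplit c s else (pvSplit c s).modifyHead (a :: ·) := rfl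

lemma splitOn_go_char (c : Char) : ∀ (fuel : Nat) (s cur : List Char) (acc : List (List Char)),
    s.length ≤ fuel →
    PySem.Chars.splitOn.go [c] fuel s cur acc
      = acc.reverse ++ (pvSplit c s).modifyHead (cur.reverse ++ ·) := by
  intro fuel
  induction fuel with
  | zero =>
    intro s cur acc h
    have hs : s = [] := by
      cases s with
      | nil => rfl
      | cons a t => simp at h
    subst hs
    rw [PySem.Chars.splitOn.go.eq_def]
    simp [pvSplit]
  | succ fuel ih =>
    intro s cur acc h
    cases s with
    | nil =>
      rw [PySem.Chars.splitOn.go.eq_def]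
      simp [pvSplit]
    | cons a rest =>
      rw [PySem.Chars.splitOn.go.eq_def]
      simp only [List.isPrefixOf, Bool.and_true]
      by_cases hac : a = c
      · subst hac
        rw [if_pos (by simp : ((a == a) = true))]
        have hdrop : List.drop [a].length (a :: rest) = rest := rfl
        rw [hdrop, ih rest [] (cur.reverse :: acc) (by simpa using Nat.le_of_succ_le_succ h)]
        rw [pvSplit_cons, if_pos rfl]
        cases hps : pvSplit a rest with
        | nil => exact absurd hps (pvSplit_ne_nil a rest)
        | cons p ps => simp [List.modifyHead]
      · rw [if_neg (by simp only [beq_iff_eq]; exact fun h => hac h.symm : ¬ ((c == a) = true))]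
        rw [ih rest (a :: cur) acc (by simpa using Nat.le_of_succ_le_succ h)]
        rw [pvSplit_cons, if_neg hac]
        cases hps : pvSplit c rest with
        | nil => exact absurd hps (pvSplit_ne_nil c rest)
        | cons p ps => simp [List.modifyHead]

lemma splitOn_char (c : Char) (s : List Char) :
    PySem.Chars.splitOn s [c] = pvSplit c s := by
  unfold PySem.Chars.splitOn
  rw [splitOn_go_char c (s.length + 1) s [] [] (by omega)]
  cases hps : pvSplit c s with
  | nil => exact absurd hps (pvSplit_ne_nil c s)
  | cons p ps => simp [List.modifyHead]

-- (even-index sum, odd-index sum) of segment lengths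
def pvEO : List (List Char) → Int × Int
  | [] => (0, 0)
  | p :: ps => ((pvEO ps).2 + (p.length : Int), (pvEO ps).1)

lemma pvEO_modifyHead (a : Char) (ps : List (List Char)) (h : ps ≠ []) :
    pvEO (ps.modifyHead (a :: ·)) = ((pvEO ps).1 + 1, (pvEO ps).2) := by
  cases ps with
  | nil => exact absurd rfl h
  | cons p ps =>
    simp [List.modifyHead, pvEO]
    omega

-- the filtered enumerate sum of B computes the even/odd index sums
lemma enum_sum (ps : List (List Char)) : ∀ (s : Int), 0 ≤ s →
    (((PySem.List.enumerate ps s).filter (fun ip => PySem.Int.mod ip.1 2 == 0)).map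
        (fun ip => PySem.List.len ip.2)).sum
      = if s % 2 = 0 then (pvEO ps).1 else (pvEO ps).2 := by
  induction ps with
  | nil => intro s _; simp [PySem.List.enumerate, pvEO]
  | cons p ps ih =>
    intro s hs
    rw [PySem.List.enumerate_cons]
    have hmod : PySem.Int.mod s 2 = s % 2 := PySem.Int.mod_eq_emod_of_pos (by omega)
    by_cases h : s % 2 = 0
    · simp only [List.filter_cons, hmod, h, beq_self_eq_true, reduceIte, List.map_cons,
        List.sum_cons]
      rw [ih (s + 1) (by omega)]
      have : ¬ (s + 1) % 2 = 0 := by omega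
      simp [pvEO, h, this, PySem.List.len]
      omega
    · have : (PySem.Int.mod s 2 == 0) = false := by
        rw [hmod]; simpa using h
      simp only [List.filter_cons, this, Bool.false_eq_true, reduceIte]
      rw [ih (s + 1) (by omega)]
      have h1 : (s + 1) % 2 = 0 := by omega
      simp [pvEO, h, h1]

-- loop invariant for A's fold, in both flag states, expressed through pvSplit
lemma loopA (c : Char) (hc : c = '`') : ∀ (s : List Char) (n : Int),
    ((s.foldl
        (fun st char =>
          if char = '`' then
            if st.2 then (st.1 + 1, false) else (st.1, true)
          else if !st.2 then (st.1 + 1, st.2)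
          else st)
        (n, false)).1
      = n + (pvEO (pvSplit c s)).1 + ((pvSplit c s).length - 1 : Int) / 2)
  ∧ ((s.foldl
        (fun st char =>
          if char = '`' then
            if st.2 then (st.1 + 1, false) else (st.1, true)
          else if !st.2 then (st.1 + 1, st.2)
          else st)
        (n, true)).1
      = n + (pvEO (pvSplit c s)).2 + ((pvSplit c s).length : Int) / 2) := by
  subst hc
  intro s
  induction s with
  | nil => intro n; simp [pvSplit, pvEO]
  | cons a s ih =>
    intro n
    have hne := pvSplit_ne_nil '`' s
    have hlen : 1 ≤ (pvSplit '`' s).length := by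
      cases hps : pvSplit '`' s with
      | nil => exact absurd hps hne
      | cons p ps => simp
    by_cases ha : a = '`'
    · subst ha
      rw [pvSplit_cons, if_pos rfl]
      constructor
      · rw [List.foldl_cons]
        simp only [reduceIte, Bool.false_eq_true, Bool.true_eq_false, ite_false, ite_true]
        rw [(ih n).2]
        simp [pvEO]
      · rw [List.foldl_cons]
        simp only [reduceIte, Bool.false_eq_true, Bool.true_eq_false, ite_false, ite_true]
        rw [(ih (n + 1)).1]
        simp [pvEO]
        omega
    · rw [pvSplit_cons, if_neg ha]
      constructor
      · rw [List.foldl_cons]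
        simp only [ha, reduceIte, Bool.not_false, Bool.false_eq_true, Bool.true_eq_false,
          ite_false, ite_true]
        rw [(ih (n + 1)).1, pvEO_modifyHead a _ hne, List.length_modifyHead]
        omega
      · rw [List.foldl_cons]
        simp only [ha, reduceIte, Bool.not_true, Bool.false_eq_true, Bool.true_eq_false,
          ite_false, ite_true]
        rw [(ih n).2, pvEO_modifyHead a _ hne, List.length_modifyHead]

-- ===== VERDICT (by name: the statement is the Claim_ definition above) =====
theorem get_text_len_spec : Claim_equal_get_text_len := by
  intro text _
  simp only [Spec_get_text_len, get_text_len, get_text_len_alt]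
  rw [splitOn_char '`' text.toList]
  rw [enum_sum (pvSplit '`' text.toList) 0 le_rfl]
  rw [PySem.Int.floordiv_eq_ediv_of_pos (by omega)]
  rw [(loopA '`' rfl text.toList 0).1]
  simp [PySem.List.len]
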